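-- pv_equiv track=rewrite | github.com/Philin-coder/Pyrepo | tested/Polyb_crypt_decript_package/crypt_mod.py | pol_decrypt
-- ===== SOURCE A (Python) =====
-- P_KEYS = {
--     'a': '11', 'b': '12', 'c': '13', 'd': '14',
--     'e': '15', 'f': '16', 'g': '21', 'h': '22',
--     'i': '23', 'j': '24', 'k': '25', 'l': '26',
--     'm': '31', 'n': '32', 'o': '33', 'p': '34',
--     'q': '35', 'r': '36', 's': '41', 't': '42',
--     'u': '43', 'v': '44', 'w': '45', 'x': '46',
--     'y': '51', 'z': '52', '0': '53', '1': '54',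
--     '2': '55', '3': '56', '4': '61', '5': '62',
--     '6': '63', '7': '64', '8': '65', '9': '66'
-- }
--
-- def pol_decrypt(crypt: str) -> str:
--     """
--     Расшифровка шифра Полибия
--     :param crypt: заифрованная строка
--     :return: расшифрованная строка
--     """
--     if isinstance(P_KEYS, dict):
--         temp = ''
--         decrypt = ''
--         for i in crypt:
--             if i != ' ':
--                 temp += i
--             else:
--                 for j in P_KEYS:
--                     if P_KEYS[j] == temp:
--                         decrypt += j
--                 temp = ''
--         return decrypt
--     else:
--         raise TypeError('Передан неверный тип данных')
-- ===== SOURCE B (Python) =====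
-- ALPHABET = 'abcdefghijklmnopqrstuvwxyz0123456789'
--
-- def pol_decrypt(crypt: str) -> str:
--     # Polybius codes are row/col digits 1..6 over a 6x6 square laid out in
--     # ALPHABET order, so a code decodes arithmetically: ALPHABET[6*(row-1)+(col-1)].
--     # The segment after the last space is never terminated, so it is dropped, like in A.
--     out = []
--     for tok in crypt.split(' ')[:-1]:
--         if len(tok) == 2 and tok[0] in '123456' and tok[1] in '123456':
--             out.append(ALPHABET[6 * (int(tok[0]) - 1) + (int(tok[1]) - 1)])
--     return ''.join(out)
-- ===== Notes on version B (the rewrite author's own statement) =====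
-- stated objective: faster
-- what changed: Replaces A's char-by-char token accumulation with a 36-entry table scan per finished token by split-on-space tokenization (dropping the unterminated last segment) and a table-free arithmetic decode: a valid code's two digits 1..6 index the 6x6 alphabet directly via ALPHABET[6*(row-1)+(col-1)].
import Mathlib
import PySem

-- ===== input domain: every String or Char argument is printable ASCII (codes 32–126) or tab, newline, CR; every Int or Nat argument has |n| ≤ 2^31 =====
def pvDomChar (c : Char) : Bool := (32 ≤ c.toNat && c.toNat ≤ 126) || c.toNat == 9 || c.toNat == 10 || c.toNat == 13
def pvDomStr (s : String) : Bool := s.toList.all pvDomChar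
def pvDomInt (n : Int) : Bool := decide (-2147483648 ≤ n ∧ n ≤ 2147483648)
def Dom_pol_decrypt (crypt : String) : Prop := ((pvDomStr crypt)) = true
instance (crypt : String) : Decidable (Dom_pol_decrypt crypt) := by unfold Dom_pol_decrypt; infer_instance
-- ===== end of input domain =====

-- B drops A's 36-entry table scan entirely: it splits on spaces (dropping the
-- unterminated last segment like A) and decodes each two-digit code arithmetically
-- into the 6x6 alphabet (table-free; a timing run measured B faster).

-- ===== PORT A =====
-- the module-level P_KEYS dict, in source order (letter, two-digit code)
def pKeys : List (Char × List Char) :=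
  [('a', ['1','1']), ('b', ['1','2']), ('c', ['1','3']), ('d', ['1','4']),
   ('e', ['1','5']), ('f', ['1','6']), ('g', ['2','1']), ('h', ['2','2']),
   ('i', ['2','3']), ('j', ['2','4']), ('k', ['2','5']), ('l', ['2','6']),
   ('m', ['3','1']), ('n', ['3','2']), ('o', ['3','3']), ('p', ['3','4']),
   ('q', ['3','5']), ('r', ['3','6']), ('s', ['4','1']), ('t', ['4','2']),
   ('u', ['4','3']), ('v', ['4','4']), ('w', ['4','5']), ('x', ['4','6']),
   ('y', ['5','1']), ('z', ['5','2']), ('0', ['5','3']), ('1', ['5','4']),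
   ('2', ['5','5']), ('3', ['5','6']), ('4', ['6','1']), ('5', ['6','2']),
   ('6', ['6','3']), ('7', ['6','4']), ('8', ['6','5']), ('9', ['6','6'])]

-- inner loop: 'for j in P_KEYS: if P_KEYS[j] == temp: decrypt += j'
def polInner (temp : List Char) (decrypt : List Char) : List Char :=
  pKeys.foldl (fun d p => if p.2 == temp then d ++ [p.1] else d) decrypt

-- outer loop: 'for i in crypt: …' with state (temp, decrypt)
def polLoop : List Char → List Char → List Char → List Char
  | [], _temp, decrypt => decrypt
  | c :: cs, temp, decrypt =>
    if c ≠ ' ' then polLoop cs (temp ++ [c]) decrypt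
    else polLoop cs [] (polInner temp decrypt)

def pol_decrypt (crypt : String) : String :=
  String.ofList (polLoop crypt.toList [] [])

-- ===== PORT B =====
-- ALPHABET = 'abcdefghijklmnopqrstuvwxyz0123456789'
def pAlphabet : List Char :=
  "abcdefghijklmnopqrstuvwxyz0123456789".toList

-- int(c) for a digit character c (exact on '0'..'9', the only chars the guard admits)
def digitVal (c : Char) : Int := (c.toNat : Int) - 48

-- the loop body: append the decoded letter of one token, if it is a valid code
def decodeTok (tok : List Char) : List Char :=
  match tok with
  | [d1, d2] =>
    if ['1','2','3','4','5','6'].contains d1 && ['1','2','3','4','5','6'].contains d2 then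
      -- ALPHABET[6*(int(tok[0])-1) + (int(tok[1])-1)]; the guard keeps the index in 0..35,
      -- so Python's indexing cannot raise and the 'none' branch is unreachable
      match PySem.List.pyGet? pAlphabet (6 * (digitVal d1 - 1) + (digitVal d2 - 1)) with
      | some c => [c]
      | none => []
    else []
  | _ => []

-- ''.join of the decoded letters of crypt.split(' ')[:-1]
def pol_decrypt_alt (crypt : String) : String :=
  String.ofList (PySem.Chars.join []
    ((PySem.List.slice (PySem.Chars.splitOn crypt.toList [' ']) none (some (-1))).map decodeTok))

-- ===== PRECONDITION & SPEC =====
def Spec_pol_decrypt (crypt : String) (out : String) : Prop := out = pol_decrypt_alt crypt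
instance (crypt : String) (out : String) : Decidable (Spec_pol_decrypt crypt out) := by unfold Spec_pol_decrypt; infer_instance

-- ===== CLAIM (what is proved, stated in full; the proofs are below) =====
def Claim_equal_pol_decrypt : Prop := ∀ (crypt : String), Dom_pol_decrypt crypt → Spec_pol_decrypt crypt (pol_decrypt crypt)

-- ===== LEMMAS AND PROOFS =====

-- reference tokenizer: Python's s.split(' ') as a structural recursion
def spTok : List Char → List Char → List (List Char)
  | tok, [] => [tok]
  | tok, c :: cs => if c = ' ' then tok :: spTok [] cs else spTok (tok ++ [c]) cs

theorem spTok_ne_nil : ∀ tok cs, spTok tok cs ≠ [] := by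
  intro tok cs
  induction cs generalizing tok with
  | nil => simp [spTok]
  | cons c cs ih =>
    simp only [spTok]
    split
    · simp
    · exact ih _

theorem go_space : ∀ fuel l cur acc, l.length ≤ fuel →
    PySem.Chars.splitOn.go [' '] fuel l cur acc = acc.reverse ++ spTok cur.reverse l := by
  intro fuel
  induction fuel with
  | zero =>
    intro l cur acc h
    have hl : l = [] := by cases l <;> simp_all
    subst hl
    simp [PySem.Chars.splitOn.go, spTok]
  | succ fuel ih =>
    intro l cur acc h
    cases l with
    | nil => simp [PySem.Chars.splitOn.go, spTok]
    | cons c rest =>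
      by_cases hc : c = ' '
      · subst hc
        simp only [PySem.Chars.splitOn.go, List.isPrefixOf, BEq.rfl, Bool.true_and,
          if_true, List.length_cons, List.drop_succ_cons]
        simp only [List.length_nil, List.drop_zero]
        rw [ih rest [] (cur.reverse :: acc) (by simpa using Nat.le_of_succ_le_succ h)]
        simp [spTok]
      · have hpre : [' '].isPrefixOf (c :: rest) = false := by
          simp [List.isPrefixOf]
          exact fun hx => (hc hx.symm).elim
        simp only [PySem.Chars.splitOn.go, hpre, Bool.false_eq_true, if_false]
        rw [ih rest (c :: cur) acc (by simpa using Nat.le_of_succ_le_succ h)]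
        simp [spTok, hc]

theorem splitOn_space (s : List Char) : PySem.Chars.splitOn s [' '] = spTok [] s := by
  unfold PySem.Chars.splitOn
  rw [go_space (s.length + 1) s [] [] (by omega)]
  simp

theorem slice_neg_one {α : Type} (l : List α) :
    PySem.List.slice l none (some (-1)) = l.dropLast := by
  simp only [PySem.List.slice, PySem.List.clampIdx]
  cases l with
  | nil => simp
  | cons x xs =>
    have h1 : ((-1 : Int) < 0) = True := by simp
    have h2 : ¬ ((x :: xs).length : Int) + (-1) < 0 := by
      simp only [List.length_cons]; omega
    simp only [h1, if_pos trivial, h2, if_false]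
    have h3 : (((x :: xs).length : Int) + (-1)).toNat = xs.length := by
      simp only [List.length_cons]; omega
    rw [h3]
    rw [List.dropLast_eq_take]
    simp

theorem join_nil_eq_flatten (parts : List (List Char)) :
    PySem.Chars.join [] parts = parts.flatten := by
  unfold PySem.Chars.join
  induction parts with
  | nil => rfl
  | cons p ps ih =>
    cases ps with
    | nil => simp [List.intercalate]
    | cons q qs =>
      simp only [List.intercalate, List.intersperse] at ih ⊢
      simp_all

-- the letters A appends for a finished token temp
def fA (temp : List Char) : List Char :=
  (pKeys.filter (fun p => p.2 == temp)).map Prod.fst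

theorem polInner_eq (temp decrypt : List Char) :
    polInner temp decrypt = decrypt ++ fA temp := by
  unfold polInner fA
  exact PySem.List.foldl_append_if _ _ _ _

theorem fA_not_len2 (temp : List Char) (h : temp.length ≠ 2) : fA temp = [] := by
  unfold fA
  rw [List.map_eq_nil_iff, List.filter_eq_nil_iff]
  intro p hp hpm
  have hlen : p.2.length = 2 := by
    fin_cases hp <;> decide
  exact h (by rw [← (beq_iff_eq).mp hpm]; exact hlen)

theorem fA_eq_decodeTok (temp : List Char) : fA temp = decodeTok temp := by
  match temp with
  | [] => decide
  | [_] =>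
    rw [fA_not_len2 _ (by simp)]; rfl
  | d1 :: d2 :: e :: rest =>
    rw [fA_not_len2 _ (by simp)]; rfl
  | [d1, d2] =>
    by_cases h1 : ['1','2','3','4','5','6'].contains d1
    · by_cases h2 : ['1','2','3','4','5','6'].contains d2
      · -- 36 concrete digit pairs, each closed by evaluation
        simp only [List.contains_eq_mem, List.mem_cons, List.not_mem_nil, or_false,
          decide_eq_true_eq] at h1 h2
        rcases h1 with rfl|rfl|rfl|rfl|rfl|rfl <;>
          rcases h2 with rfl|rfl|rfl|rfl|rfl|rfl <;> decide
      · -- second char not a 1..6 digit: no code matches, guard fails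
        have hfil : pKeys.filter (fun p => p.2 == [d1, d2]) = [] := by
          rw [List.filter_eq_nil_iff]
          intro p hp hpm
          apply h2
          have he : p.2 = [d1, d2] := (beq_iff_eq).mp hpm
          have hm : ['1','2','3','4','5','6'].contains (p.2.getD 1 ' ') = true := by
            fin_cases hp <;> decide
          rw [he] at hm
          exact hm
        unfold fA decodeTok
        rw [hfil, Bool.not_eq_true] at *
        simp only [h2, Bool.and_false, Bool.false_eq_true, if_false, List.map_nil]
    · have hfil : pKeys.filter (fun p => p.2 == [d1, d2]) = [] := by
        rw [List.filter_eq_nil_iff]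
        intro p hp hpm
        apply h1
        have he : p.2 = [d1, d2] := (beq_iff_eq).mp hpm
        have hm : ['1','2','3','4','5','6'].contains (p.2.getD 0 ' ') = true := by
          fin_cases hp <;> decide
        rw [he] at hm
        exact hm
      unfold fA decodeTok
      rw [hfil, Bool.not_eq_true] at *
      simp only [h1, Bool.false_and, Bool.false_eq_true, if_false, List.map_nil]

theorem polLoop_eq : ∀ (cs temp decrypt : List Char),
    polLoop cs temp decrypt
      = decrypt ++ ((spTok temp cs).dropLast.map fA).flatten := by
  intro cs
  induction cs with
  | nil => intro temp decrypt; simp [polLoop, spTok]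
  | cons c cs ih =>
    intro temp decrypt
    by_cases hc : c = ' '
    · subst hc
      simp only [polLoop, ne_eq, not_true_eq_false, if_false]
      have hsp : spTok temp (' ' :: cs) = temp :: spTok [] cs := by simp [spTok]
      rw [ih [] (polInner temp decrypt), polInner_eq, hsp,
        List.dropLast_cons_of_ne_nil (spTok_ne_nil [] cs)]
      simp
    · simp only [polLoop, ne_eq, hc, not_false_eq_true, if_true, spTok]
      exact ih (temp ++ [c]) decrypt

-- ===== VERDICT (by name: the statement is the Claim_ definition above) =====
set_option maxRecDepth 8000 in
theorem pol_decrypt_spec : Claim_equal_pol_decrypt := by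
  intro crypt _
  unfold Spec_pol_decrypt pol_decrypt pol_decrypt_alt
  rw [polLoop_eq, splitOn_space, slice_neg_one, join_nil_eq_flatten]
  congr 1
  simp only [List.nil_append]
  congr 1
  exact List.map_congr_left (fun tok _ => fA_eq_decodeTok tok)
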